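-- pv_equiv track=rewrite | github.com/jamesee/kattis | consultation_7Nov.py | calculate_areas
-- ===== SOURCE A (Python) =====
-- def calculate_areas(w_list: list[int], h_list: list[int]) -> tuple[int, int, int]:
--
--     n = 3
--     colors = dict.fromkeys(list(range(n)), 0)
--     h_sums = dict.fromkeys(list(range(n)), 0)
--     w_sums = dict.fromkeys(list(range(n)), 0)
--
--     for j, h in enumerate(h_list):
--         h_sums[j % n] += h
--     for i, w in enumerate(w_list):
--         w_sums[i % n] += w
--
--     for i in range(n):
--         for j in range(n):
--             colors[(i + j) % n] += w_sums[i] * h_sums[j]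
--
--     return tuple(colors.values())
-- ===== SOURCE B (Python) =====
-- def calculate_areas(w_list: list[int], h_list: list[int]) -> tuple[int, int, int]:
--     c0 = c1 = c2 = 0
--     for i, w in enumerate(w_list):
--         for j, h in enumerate(h_list):
--             r = (i + j) % 3
--             if r == 0:
--                 c0 += w * h
--             elif r == 1:
--                 c1 += w * h
--             else:
--                 c2 += w * h
--     return (c0, c1, c2)
-- ===== Notes on version B (the rewrite author's own statement) =====
-- stated objective: simpler
-- what changed: A factors the grid into per-residue sums of widths and heights (two dict-building passes) and recombines them with a 3x3 product loop over dicts; B just walks every (i, j) cell once and adds w*h into one of three scalar counters keyed by (i+j)%3.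
import Mathlib
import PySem

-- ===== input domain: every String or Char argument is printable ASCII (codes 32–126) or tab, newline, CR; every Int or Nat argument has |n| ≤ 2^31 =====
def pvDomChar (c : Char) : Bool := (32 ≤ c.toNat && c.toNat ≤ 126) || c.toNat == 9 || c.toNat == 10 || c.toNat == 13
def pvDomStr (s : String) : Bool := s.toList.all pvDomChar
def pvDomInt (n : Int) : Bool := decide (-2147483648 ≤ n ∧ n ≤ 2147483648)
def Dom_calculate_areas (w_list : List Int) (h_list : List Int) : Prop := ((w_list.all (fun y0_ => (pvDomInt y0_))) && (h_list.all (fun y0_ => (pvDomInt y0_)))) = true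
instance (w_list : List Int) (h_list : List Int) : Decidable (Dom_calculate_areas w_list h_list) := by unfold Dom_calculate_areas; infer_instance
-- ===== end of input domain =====

-- B replaces A's factored per-residue width/height sums and 3×3 recombination by the direct
-- double loop over all (i, j) cells, adding w*h into the (i+j)%3 bucket (objective: simpler).

-- ===== PORT A =====
-- dict.fromkeys(list(range(3)), 0)
def pvFromkeys3 : PySem.Dict Int Int :=
  (PySem.List.pyRange 0 3 1).foldl (fun d k => d.insert k 0) PySem.Dict.empty

-- 'for j, h in enumerate(lst): d[j % 3] += h'  (the key j % 3 is always one of the dict's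
-- keys 0, 1, 2, so Python's read-then-store d[k] += h is exactly insert k (getD k 0 + h))
def pvSumLoop : Int → List Int → PySem.Dict Int Int → PySem.Dict Int Int
  | _, [], d => d
  | j, x :: rest, d =>
      pvSumLoop (j + 1) rest (d.insert (PySem.Int.mod j 3) (d.getD (PySem.Int.mod j 3) 0 + x))

def calculate_areas (w_list : List Int) (h_list : List Int) : Int × Int × Int :=
  let h_sums := pvSumLoop 0 h_list pvFromkeys3
  let w_sums := pvSumLoop 0 w_list pvFromkeys3
  let colors := (PySem.List.pyRange 0 3 1).foldl (fun c i =>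
      (PySem.List.pyRange 0 3 1).foldl (fun c j =>
        c.insert (PySem.Int.mod (i + j) 3)
          (c.getD (PySem.Int.mod (i + j) 3) 0 + w_sums.getD i 0 * h_sums.getD j 0)) c)
    pvFromkeys3
  -- tuple(colors.values()): the dict always has exactly the three values at keys 0, 1, 2
  (colors.values.getD 0 0, colors.values.getD 1 0, colors.values.getD 2 0)

-- ===== PORT B =====
-- 'if r == 0: c0 += x elif r == 1: c1 += x else: c2 += x' on the state (c0, c1, c2)
def pvBump3 (t : Int × Int × Int) (r : Int) (x : Int) : Int × Int × Int :=
  if r = 0 then (t.1 + x, t.2.1, t.2.2)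
  else if r = 1 then (t.1, t.2.1 + x, t.2.2)
  else (t.1, t.2.1, t.2.2 + x)

def pvInner (i w : Int) : Int → List Int → (Int × Int × Int) → Int × Int × Int
  | _, [], t => t
  | j, h :: rest, t => pvInner i w (j + 1) rest (pvBump3 t (PySem.Int.mod (i + j) 3) (w * h))

def pvOuter (h_list : List Int) : Int → List Int → (Int × Int × Int) → Int × Int × Int
  | _, [], t => t
  | i, w :: rest, t => pvOuter h_list (i + 1) rest (pvInner i w 0 h_list t)

def calculate_areas_alt (w_list : List Int) (h_list : List Int) : Int × Int × Int :=
  pvOuter h_list 0 w_list (0, 0, 0)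

-- ===== PRECONDITION & SPEC =====
def Spec_calculate_areas (w_list : List Int) (h_list : List Int) (out : Int × Int × Int) : Prop := out = calculate_areas_alt w_list h_list
instance (w_list : List Int) (h_list : List Int) (out : Int × Int × Int) : Decidable (Spec_calculate_areas w_list h_list out) := by unfold Spec_calculate_areas; infer_instance

-- ===== CLAIM (what is proved, stated in full; the proofs are below) =====
def Claim_equal_calculate_areas : Prop := ∀ (w_list : List Int) (h_list : List Int), Dom_calculate_areas w_list h_list → Spec_calculate_areas w_list h_list (calculate_areas w_list h_list)

-- ===== LEMMAS AND PROOFS =====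

-- sum of the elements of the list whose running index (starting at m) is ≡ k (mod 3)
def pvS (k : Int) : Int → List Int → Int
  | _, [] => 0
  | m, x :: rest => (if PySem.Int.mod m 3 = k then x else 0) + pvS k (m + 1) rest

theorem pvmod3 (m : Int) : PySem.Int.mod m 3 = m % 3 :=
  PySem.Int.mod_eq_emod_of_pos (by norm_num)

theorem pvS_congr (hs : List Int) : ∀ (k k' m m' : Int), 0 ≤ k → k < 3 → 0 ≤ k' → k' < 3 →
    (k - m) % 3 = (k' - m') % 3 → pvS k m hs = pvS k' m' hs := by
  induction hs with
  | nil => intro k k' m m' _ _ _ _ _; rfl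
  | cons x hs ih =>
    intro k k' m m' hk0 hk3 hk0' hk3' hmm
    have h1 : (PySem.Int.mod m 3 = k) ↔ (PySem.Int.mod m' 3 = k') := by
      rw [pvmod3, pvmod3]; omega
    by_cases hc : PySem.Int.mod m 3 = k
    · rw [pvS, pvS, if_pos hc, if_pos (h1.mp hc),
        ih k k' (m + 1) (m' + 1) hk0 hk3 hk0' hk3' (by omega)]
    · rw [pvS, pvS, if_neg hc, if_neg (fun h => hc (h1.mpr h)),
        ih k k' (m + 1) (m' + 1) hk0 hk3 hk0' hk3' (by omega)]

theorem pvSumLoop_getD (hs : List Int) : ∀ (j : Int) (d : PySem.Dict Int Int) (k : Int),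
    (pvSumLoop j hs d).getD k 0 = d.getD k 0 + pvS k j hs := by
  induction hs with
  | nil => intro j d k; simp [pvSumLoop, pvS]
  | cons x hs ih =>
    intro j d k
    rw [pvSumLoop, ih, pvS, PySem.Dict.getD_insert]
    by_cases hk : k = PySem.Int.mod j 3
    · rw [if_pos hk, if_pos hk.symm, hk]; ring
    · rw [if_neg hk, if_neg (fun h => hk h.symm)]; ring

theorem pvmk : pvFromkeys3 = PySem.Dict.mk [(0, 0), (1, 0), (2, 0)] := rfl
theorem pvIns0 (a b c v : Int) : (PySem.Dict.mk [((0 : Int), a), (1, b), (2, c)]).insert 0 v = PySem.Dict.mk [(0, v), (1, b), (2, c)] := rfl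
theorem pvIns1 (a b c v : Int) : (PySem.Dict.mk [((0 : Int), a), (1, b), (2, c)]).insert 1 v = PySem.Dict.mk [(0, a), (1, v), (2, c)] := rfl
theorem pvIns2 (a b c v : Int) : (PySem.Dict.mk [((0 : Int), a), (1, b), (2, c)]).insert 2 v = PySem.Dict.mk [(0, a), (1, b), (2, v)] := rfl
theorem pvGet0 (a b c : Int) : (PySem.Dict.mk [((0 : Int), a), (1, b), (2, c)]).getD 0 0 = a := rfl
theorem pvGet1 (a b c : Int) : (PySem.Dict.mk [((0 : Int), a), (1, b), (2, c)]).getD 1 0 = b := rfl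
theorem pvGet2 (a b c : Int) : (PySem.Dict.mk [((0 : Int), a), (1, b), (2, c)]).getD 2 0 = c := rfl
theorem pvVal (a b c : Int) : (PySem.Dict.mk [((0 : Int), a), (1, b), (2, c)]).values = [a, b, c] := rfl

-- the concrete 3×3 colors loop, for an arbitrary value table f
theorem pvColors (f : Int → Int → Int) :
    ((PySem.List.pyRange 0 3 1).foldl (fun c i =>
      (PySem.List.pyRange 0 3 1).foldl (fun c j =>
        c.insert (PySem.Int.mod (i + j) 3)
          (c.getD (PySem.Int.mod (i + j) 3) 0 + f i j)) c) pvFromkeys3).values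
    = [f 0 0 + f 1 2 + f 2 1, f 0 1 + f 1 0 + f 2 2, f 0 2 + f 1 1 + f 2 0] := by
  have hr : PySem.List.pyRange 0 3 1 = [0, 1, 2] := by decide
  rw [hr, pvmk]
  simp only [List.foldl, pvmod3]
  norm_num
  simp only [pvIns0, pvIns1, pvIns2, pvGet0, pvGet1, pvGet2, pvVal]
  norm_num

def pvT (k : Int) (hs : List Int) : Int → List Int → Int
  | _, [] => 0
  | i, w :: ws => w * pvS k i hs + pvT k hs (i + 1) ws

theorem pvInner_eq (i w : Int) (hs : List Int) : ∀ (j : Int) (t : Int × Int × Int),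
    pvInner i w j hs t = (t.1 + w * pvS 0 (i + j) hs, t.2.1 + w * pvS 1 (i + j) hs,
      t.2.2 + w * pvS 2 (i + j) hs) := by
  induction hs with
  | nil => intro j t; simp [pvInner, pvS]
  | cons x hs ih =>
    intro j t
    rw [pvInner, ih]
    have h3 : PySem.Int.mod (i + j) 3 = 0 ∨ PySem.Int.mod (i + j) 3 = 1 ∨
        PySem.Int.mod (i + j) 3 = 2 := by rw [pvmod3]; omega
    have harg : i + (j + 1) = (i + j) + 1 := by ring
    rcases h3 with h | h | h <;>
      · simp only [pvS, pvBump3, h, harg, Prod.mk.injEq]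
        norm_num
        ring

theorem pvOuter_eq (hs ws : List Int) : ∀ (i : Int) (t : Int × Int × Int),
    pvOuter hs i ws t = (t.1 + pvT 0 hs i ws, t.2.1 + pvT 1 hs i ws, t.2.2 + pvT 2 hs i ws) := by
  induction ws with
  | nil => intro i t; simp [pvOuter, pvT]
  | cons w ws ih =>
    intro i t
    rw [pvOuter, pvInner_eq, ih, pvT, pvT, pvT]
    simp only [Prod.mk.injEq]
    refine ⟨by ring, by ring, by ring⟩

theorem pvT_eq (k : Int) (hk0 : 0 ≤ k) (hk3 : k < 3) (hs ws : List Int) : ∀ (i : Int),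
    pvT k hs i ws = pvS 0 i ws * pvS k 0 hs + pvS 1 i ws * pvS k 1 hs + pvS 2 i ws * pvS k 2 hs := by
  induction ws with
  | nil => intro i; simp [pvT, pvS]
  | cons w ws ih =>
    intro i
    rw [pvT, ih, pvS, pvS, pvS]
    have h3 : PySem.Int.mod i 3 = 0 ∨ PySem.Int.mod i 3 = 1 ∨ PySem.Int.mod i 3 = 2 := by
      rw [pvmod3]; omega
    rcases h3 with h | h | h
    · have hr : pvS k i hs = pvS k 0 hs :=
        pvS_congr hs k k i 0 hk0 hk3 hk0 hk3 (by rw [pvmod3] at h; omega)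
      simp only [h, hr]; norm_num; ring
    · have hr : pvS k i hs = pvS k 1 hs :=
        pvS_congr hs k k i 1 hk0 hk3 hk0 hk3 (by rw [pvmod3] at h; omega)
      simp only [h, hr]; norm_num; ring
    · have hr : pvS k i hs = pvS k 2 hs :=
        pvS_congr hs k k i 2 hk0 hk3 hk0 hk3 (by rw [pvmod3] at h; omega)
      simp only [h, hr]; norm_num; ring

-- ===== VERDICT (by name: the statement is the Claim_ definition above) =====
theorem calculate_areas_spec : Claim_equal_calculate_areas := by
  intro w h _
  unfold Spec_calculate_areas
  have hW : ∀ k : Int, (pvSumLoop 0 w pvFromkeys3).getD k 0 = pvFromkeys3.getD k 0 + pvS k 0 w :=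
    fun k => pvSumLoop_getD w 0 pvFromkeys3 k
  have hH : ∀ k : Int, (pvSumLoop 0 h pvFromkeys3).getD k 0 = pvFromkeys3.getD k 0 + pvS k 0 h :=
    fun k => pvSumLoop_getD h 0 pvFromkeys3 k
  have hA : calculate_areas w h =
      (pvS 0 0 w * pvS 0 0 h + pvS 1 0 w * pvS 2 0 h + pvS 2 0 w * pvS 1 0 h,
       pvS 0 0 w * pvS 1 0 h + pvS 1 0 w * pvS 0 0 h + pvS 2 0 w * pvS 2 0 h,
       pvS 0 0 w * pvS 2 0 h + pvS 1 0 w * pvS 1 0 h + pvS 2 0 w * pvS 0 0 h) := by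
    simp only [calculate_areas]
    rw [pvColors (fun i j => (pvSumLoop 0 w pvFromkeys3).getD i 0 * (pvSumLoop 0 h pvFromkeys3).getD j 0)]
    simp only [List.getD]
    norm_num
    simp only [hW, hH]
    simp only [pvmk, pvGet0, pvGet1, pvGet2, zero_add]
    norm_num
  have hB : calculate_areas_alt w h = (pvT 0 h 0 w, pvT 1 h 0 w, pvT 2 h 0 w) := by
    simp only [calculate_areas_alt]
    rw [pvOuter_eq]
    norm_num
  rw [hA, hB,
    pvT_eq 0 (by norm_num) (by norm_num) h w 0,
    pvT_eq 1 (by norm_num) (by norm_num) h w 0,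
    pvT_eq 2 (by norm_num) (by norm_num) h w 0,
    show pvS 0 1 h = pvS 2 0 h from
      pvS_congr h 0 2 1 0 (by norm_num) (by norm_num) (by norm_num) (by norm_num) (by decide),
    show pvS 0 2 h = pvS 1 0 h from
      pvS_congr h 0 1 2 0 (by norm_num) (by norm_num) (by norm_num) (by norm_num) (by decide),
    show pvS 1 1 h = pvS 0 0 h from
      pvS_congr h 1 0 1 0 (by norm_num) (by norm_num) (by norm_num) (by norm_num) (by decide),
    show pvS 1 2 h = pvS 2 0 h from
      pvS_congr h 1 2 2 0 (by norm_num) (by norm_num) (by norm_num) (by norm_num) (by decide),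
    show pvS 2 1 h = pvS 1 0 h from
      pvS_congr h 2 1 1 0 (by norm_num) (by norm_num) (by norm_num) (by norm_num) (by decide),
    show pvS 2 2 h = pvS 0 0 h from
      pvS_congr h 2 0 2 0 (by norm_num) (by norm_num) (by norm_num) (by norm_num) (by decide)]
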